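-- pv_equiv track=rewrite | github.com/gtb08177/advent-of-code | 2023/Day 7/main.py | compare_cards
-- ===== SOURCE A (Python) =====
-- def compare_cards(card_list_one, card_list_two, index=0):
--     # Base case, if we have compared all the cards and we reach here, something is wrong.
--     if index == len(card_list_one) or index == len(card_list_two):
--         return None
--
--     if card_list_one[index] > card_list_two[index]:
--         return True
--     elif card_list_two[index] > card_list_one[index]:
--         return False
--     else:
--         return compare_cards(card_list_one,card_list_two,index+1)
-- ===== SOURCE B (Python) =====
-- def compare_cards(card_list_one, card_list_two, index=0):
--     for i in range(index, min(len(card_list_one), len(card_list_two))):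
--         a = card_list_one[i]
--         b = card_list_two[i]
--         if a > b:
--             return True
--         if b > a:
--             return False
--     return None
-- ===== Notes on version B (the rewrite author's own statement) =====
-- stated objective: simpler
-- what changed: Replaced the recursive descent with per-call base-case length checks by a single iterative for-loop over range(index, min(len1, len2)) returning on the first unequal position.
-- crash fix: When index exceeds min(len1,len2) and equals neither length, A raises IndexError while B's empty loop returns None. — e.g. on compare_cards([1], [2, 3], 3): A raises IndexError, B returns none
import Mathlib
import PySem

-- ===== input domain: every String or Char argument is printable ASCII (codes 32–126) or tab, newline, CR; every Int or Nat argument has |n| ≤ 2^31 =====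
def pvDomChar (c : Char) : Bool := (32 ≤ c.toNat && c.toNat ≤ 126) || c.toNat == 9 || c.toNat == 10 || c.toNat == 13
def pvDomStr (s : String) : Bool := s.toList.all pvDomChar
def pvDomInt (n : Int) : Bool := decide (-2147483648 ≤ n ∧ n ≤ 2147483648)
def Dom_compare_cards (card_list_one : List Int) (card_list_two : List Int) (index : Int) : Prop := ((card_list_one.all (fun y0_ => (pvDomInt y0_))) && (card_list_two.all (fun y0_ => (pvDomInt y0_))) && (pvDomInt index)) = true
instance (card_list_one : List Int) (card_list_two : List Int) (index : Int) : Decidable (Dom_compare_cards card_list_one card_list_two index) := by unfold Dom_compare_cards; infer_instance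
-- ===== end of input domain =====

-- B replaces A's recursive descent by a single iterative loop over range(index, min(len1,len2)); objective: simpler.

-- ===== PORT A =====
-- literal port of A's recursion; the `| _, _ => none` arm is an IndexError, excluded by Pre_
def compare_cards (card_list_one : List Int) (card_list_two : List Int) (index : Int) : Option Bool :=
  if index = (card_list_one.length : Int) ∨ index = (card_list_two.length : Int) then none
  else
    match h1 : PySem.List.pyGet? card_list_one index, h2 : PySem.List.pyGet? card_list_two index with
    | some a, some b =>
        if a > b then some true
        else if b > a then some false
        else compare_cards card_list_one card_list_two (index + 1)
    | _, _ => none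
termination_by ((min (card_list_one.length : Int) (card_list_two.length : Int)) - index).toNat
decreasing_by
  have k1 : PySem.Raise.InRange card_list_one.length index := by
    by_contra hc
    rw [← PySem.List.pyGet?_eq_none_iff (xs := card_list_one)] at hc
    simp [hc] at h1
  have k2 : PySem.Raise.InRange card_list_two.length index := by
    by_contra hc
    rw [← PySem.List.pyGet?_eq_none_iff (xs := card_list_two)] at hc
    simp [hc] at h2
  simp [PySem.Raise.InRange] at k1 k2
  omega

-- ===== PORT B =====
-- B's loop body: walk the remaining loop indices; `| _, _ => none` = IndexError, excluded by Pre_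
def ccAltGo (card_list_one : List Int) (card_list_two : List Int) : List Int → Option Bool
  | [] => none
  | i :: rest =>
    match PySem.List.pyGet? card_list_one i with
    | none => none
    | some a =>
      match PySem.List.pyGet? card_list_two i with
      | none => none
      | some b =>
          if a > b then some true
          else if b > a then some false
          else ccAltGo card_list_one card_list_two rest

def compare_cards_alt (card_list_one : List Int) (card_list_two : List Int) (index : Int) : Option Bool :=
  ccAltGo card_list_one card_list_two
    (PySem.List.pyRange index (min (card_list_one.length : Int) (card_list_two.length : Int)) 1)

-- ===== PRECONDITION & SPEC =====
-- Pre_ is exactly the set of inputs on which A returns (elsewhere A raises IndexError):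
-- every index visited by the recursion must be a valid (possibly negative) position in both lists.
def Pre_compare_cards (card_list_one : List Int) (card_list_two : List Int) (index : Int) : Prop :=
  (-(min (card_list_one.length : Int) (card_list_two.length : Int)) ≤ index ∧
     index ≤ min (card_list_one.length : Int) (card_list_two.length : Int)) ∨
  index = (card_list_one.length : Int) ∨ index = (card_list_two.length : Int)
instance (card_list_one : List Int) (card_list_two : List Int) (index : Int) : Decidable (Pre_compare_cards card_list_one card_list_two index) := by unfold Pre_compare_cards; infer_instance

def pvWitness_compare_cards : List Int × List Int × Int := ([3, 1], [3, 2], 0)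

-- When index exceeds min(len1,len2) and equals neither length, A raises IndexError while B's empty loop returns None
-- (checked below by compare_cards_raises).
def Raises_compare_cards (card_list_one : List Int) (card_list_two : List Int) (index : Int) : Prop :=
  min (card_list_one.length : Int) (card_list_two.length : Int) < index ∧
  index ≠ (card_list_one.length : Int) ∧ index ≠ (card_list_two.length : Int)
instance (card_list_one : List Int) (card_list_two : List Int) (index : Int) : Decidable (Raises_compare_cards card_list_one card_list_two index) := by unfold Raises_compare_cards; infer_instance
def pvRaiseWitness_compare_cards : List Int × List Int × Int := ([1], [2, 3], 3)
def pvRaiseWitnessOut_compare_cards : Option Bool := none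

def Spec_compare_cards (card_list_one : List Int) (card_list_two : List Int) (index : Int) (out : Option Bool) : Prop := out = compare_cards_alt card_list_one card_list_two index
instance (card_list_one : List Int) (card_list_two : List Int) (index : Int) (out : Option Bool) : Decidable (Spec_compare_cards card_list_one card_list_two index out) := by unfold Spec_compare_cards; infer_instance

-- ===== CLAIM (what is proved, stated in full; the proofs are below) =====
def Claim_equal_compare_cards : Prop := ∀ (card_list_one : List Int) (card_list_two : List Int) (index : Int), Dom_compare_cards card_list_one card_list_two index → Pre_compare_cards card_list_one card_list_two index → Spec_compare_cards card_list_one card_list_two index (compare_cards card_list_one card_list_two index)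

def Claim_raises_compare_cards : Prop := (∀ (card_list_one : List Int) (card_list_two : List Int) (index : Int), Dom_compare_cards card_list_one card_list_two index → Raises_compare_cards card_list_one card_list_two index → ¬ Pre_compare_cards card_list_one card_list_two index) ∧ (Dom_compare_cards (pvRaiseWitness_compare_cards.1) (pvRaiseWitness_compare_cards.2.1) (pvRaiseWitness_compare_cards.2.2) ∧ Raises_compare_cards (pvRaiseWitness_compare_cards.1) (pvRaiseWitness_compare_cards.2.1) (pvRaiseWitness_compare_cards.2.2) ∧ compare_cards_alt (pvRaiseWitness_compare_cards.1) (pvRaiseWitness_compare_cards.2.1) (pvRaiseWitness_compare_cards.2.2) = pvRaiseWitnessOut_compare_cards)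

-- ===== LEMMAS AND PROOFS =====

lemma cc_eq_alt (l1 l2 : List Int) :
    ∀ (n : ℕ) (index : Int),
      ((min (l1.length : Int) (l2.length : Int)) - index).toNat ≤ n →
      Pre_compare_cards l1 l2 index →
      compare_cards l1 l2 index =
        ccAltGo l1 l2 (PySem.List.pyRange index (min (l1.length : Int) (l2.length : Int)) 1) := by
  intro n
  induction n with
  | zero =>
      intro index hn hpre
      -- measure 0: index ≥ min, so index = len1 or len2, both sides are none
      have hm : min (l1.length : Int) (l2.length : Int) ≤ index := by omega
      have hbase : index = (l1.length : Int) ∨ index = (l2.length : Int) := by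
        rcases hpre with ⟨h1, h2⟩ | h | h
        · omega
        · exact Or.inl h
        · exact Or.inr h
      rw [compare_cards, if_pos hbase, PySem.List.pyRange_one_eq_nil hm, ccAltGo]
  | succ n ih =>
      intro index hn hpre
      by_cases hbase : index = (l1.length : Int) ∨ index = (l2.length : Int)
      · have hm : min (l1.length : Int) (l2.length : Int) ≤ index := by omega
        rw [compare_cards, if_pos hbase, PySem.List.pyRange_one_eq_nil hm, ccAltGo]
      · -- not at a base case: Pre_ forces -min ≤ index < min, both accesses succeed
        have hlt : index < min (l1.length : Int) (l2.length : Int) := by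
          rcases hpre with ⟨h1, h2⟩ | h | h
          · rcases lt_or_eq_of_le h2 with h | h
            · exact h
            · exfalso; rcases min_cases (l1.length : Int) (l2.length : Int) with ⟨he, _⟩ | ⟨he, _⟩ <;> omega
          · exact absurd (Or.inl h) hbase
          · exact absurd (Or.inr h) hbase
        have hge : -(min (l1.length : Int) (l2.length : Int)) ≤ index := by
          rcases hpre with ⟨h1, _⟩ | h | h
          · exact h1
          · exact absurd (Or.inl h) hbase
          · exact absurd (Or.inr h) hbase
        have hin1 : PySem.Raise.InRange l1.length index := by
          simp [PySem.Raise.InRange]; omega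
        have hin2 : PySem.Raise.InRange l2.length index := by
          simp [PySem.Raise.InRange]; omega
        obtain ⟨a, ha⟩ : ∃ a, PySem.List.pyGet? l1 index = some a := by
          rcases h : PySem.List.pyGet? l1 index with _ | a
          · rw [PySem.List.pyGet?_eq_none_iff] at h; exact absurd hin1 h
          · exact ⟨a, rfl⟩
        obtain ⟨b, hb⟩ : ∃ b, PySem.List.pyGet? l2 index = some b := by
          rcases h : PySem.List.pyGet? l2 index with _ | b
          · rw [PySem.List.pyGet?_eq_none_iff] at h; exact absurd hin2 h
          · exact ⟨b, rfl⟩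
        rw [PySem.List.pyRange_one_cons hlt]
        rw [compare_cards, if_neg hbase]
        rw [ccAltGo]
        simp only [ha, hb]
        split
        · next a' b' h1 h2 =>
            rw [ha] at h1; rw [hb] at h2
            cases h1; cases h2
            by_cases hab : b < a
            · simp [hab]
            · by_cases hba : a < b
              · simp [hab, hba]
              · simp only [hab, hba, if_false]
                exact ih (index + 1) (by omega) (Or.inl ⟨by omega, by omega⟩)
        · next h =>
            exact absurd (h a b ha hb) (by simp)

-- ===== VERDICT (by name: the statement is the Claim_ definition above) =====
theorem compare_cards_spec : Claim_equal_compare_cards := by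
  intro l1 l2 index _ hpre
  unfold Spec_compare_cards compare_cards_alt
  exact cc_eq_alt l1 l2 ((min (l1.length : Int) (l2.length : Int)) - index).toNat index le_rfl hpre

@[simp] theorem compare_cards_raises : Claim_raises_compare_cards := by
  unfold Claim_raises_compare_cards
  constructor
  · intro l1 l2 index _ hr hpre
    unfold Raises_compare_cards at hr
    unfold Pre_compare_cards at hpre
    rcases min_cases (l1.length : Int) (l2.length : Int) with ⟨he, _⟩ | ⟨he, _⟩ <;> omega
  · exact ⟨by decide, by decide, by decide⟩
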